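-- pv_equiv track=rewrite | github.com/Saiyara-Islam-123/PSYCHE-D-Dataset-ML | dataset.py | largest_sublist
-- ===== SOURCE A (Python) =====
-- def largest_sublist(list_r):
--     sublist = [list_r[0]]
--     largest_sublist = []
--
--
--     for i in range(1, len(list_r)):
--         if list_r[i] - sublist[-1] == 1:
--             sublist.append(list_r[i])
--
--         else:
--             sublist = [list_r[i]]
--
--         if len(sublist) > len(largest_sublist):
--             largest_sublist = sublist
--
--
--
--     return largest_sublist
-- ===== SOURCE B (Python) =====
-- def largest_sublist(list_r):
--     best_len = 0
--     best_end = 0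
--     cur = 1
--     for i in range(1, len(list_r)):
--         cur = cur + 1 if list_r[i] - list_r[i - 1] == 1 else 1
--         if cur > best_len:
--             best_len, best_end = cur, i
--     return list_r[best_end + 1 - best_len : best_end + 1]
-- ===== Notes on version B (the rewrite author's own statement) =====
-- stated objective: faster
-- what changed: B replaces A's building and repeated copying of candidate sublists by a constant-extra-space dynamic program over run lengths (cur/best_len/best_end) with a single slice at the end; Pre_ excludes only the empty list, on which A raises IndexError.
-- outside the precondition, e.g. on largest_sublist([]): A raises IndexError, B returns []
-- crash fix: On the empty list A raises IndexError (list_r[0]); B returns []. — e.g. on largest_sublist([]): A raises IndexError, B returns ([])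
import Mathlib
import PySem

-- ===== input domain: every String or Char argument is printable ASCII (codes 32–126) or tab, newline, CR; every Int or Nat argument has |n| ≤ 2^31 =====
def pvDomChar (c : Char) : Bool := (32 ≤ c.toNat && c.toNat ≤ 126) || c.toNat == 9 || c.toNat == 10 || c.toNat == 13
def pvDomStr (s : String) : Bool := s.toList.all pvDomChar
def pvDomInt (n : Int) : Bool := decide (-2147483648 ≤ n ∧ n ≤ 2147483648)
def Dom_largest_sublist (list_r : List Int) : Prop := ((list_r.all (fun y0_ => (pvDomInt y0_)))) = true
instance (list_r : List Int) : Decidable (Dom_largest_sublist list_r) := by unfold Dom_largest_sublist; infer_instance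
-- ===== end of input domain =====

-- B replaces A's building and copying of candidate sublists by a constant-extra-space
-- dynamic program over run lengths (cur / best_len / best_end) with one final slice.

-- ===== PORT A =====
-- one iteration of A's for-loop over state (sublist, largest_sublist)
def lsStepA (st : List Int × List Int) (xi : Int) : List Int × List Int :=
  let sub := if xi - PySem.List.pyGetD st.1 (-1) 0 = 1 then st.1 ++ [xi] else [xi]
  (sub, if st.2.length < sub.length then sub else st.2)

def largest_sublist (list_r : List Int) : List Int :=
  match list_r with
  | [] => []          -- Python raises IndexError on list_r[0]; excluded by Pre_
  | x :: rest => (rest.foldl lsStepA ([x], [])).2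

-- ===== PORT B =====
-- one iteration of B's for-loop over state (best_len, best_end, cur), i the index
def lsStepB (l : List Int) (st : Int × Int × Int) (i : Int) : Int × Int × Int :=
  let cur := if PySem.List.pyGetD l i 0 - PySem.List.pyGetD l (i - 1) 0 = 1
             then st.2.2 + 1 else 1
  if st.1 < cur then (cur, i, cur) else (st.1, st.2.1, cur)

def largest_sublist_alt (list_r : List Int) : List Int :=
  let st := (PySem.List.pyRange 1 list_r.length 1).foldl (lsStepB list_r) (0, 0, 1)
  PySem.List.slice list_r (some (st.2.1 + 1 - st.1)) (some (st.2.1 + 1))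

-- ===== PRECONDITION & SPEC =====
-- Pre_ excludes only the empty list, on which A raises IndexError (list_r[0]).
def Pre_largest_sublist (list_r : List Int) : Prop := list_r ≠ []
instance (list_r : List Int) : Decidable (Pre_largest_sublist list_r) := by unfold Pre_largest_sublist; infer_instance
def pvWitness_largest_sublist : List Int := ([1, 2, 3, 7])

-- On the empty list A raises IndexError (list_r[0]); B returns [].
def Raises_largest_sublist (list_r : List Int) : Prop := list_r = []
instance (list_r : List Int) : Decidable (Raises_largest_sublist list_r) := by unfold Raises_largest_sublist; infer_instance
def pvRaiseWitness_largest_sublist : List Int := ([])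
def pvRaiseWitnessOut_largest_sublist : List Int := ([])

def Spec_largest_sublist (list_r : List Int) (out : List Int) : Prop := out = largest_sublist_alt list_r
instance (list_r : List Int) (out : List Int) : Decidable (Spec_largest_sublist list_r out) := by unfold Spec_largest_sublist; infer_instance

-- ===== CLAIM (what is proved, stated in full; the proofs are below) =====
def Claim_equal_largest_sublist : Prop := ∀ (list_r : List Int), Dom_largest_sublist list_r → Pre_largest_sublist list_r → Spec_largest_sublist list_r (largest_sublist list_r)
def Claim_raises_largest_sublist : Prop := (∀ (list_r : List Int), Dom_largest_sublist list_r → Raises_largest_sublist list_r → ¬ Pre_largest_sublist list_r) ∧ (Dom_largest_sublist (pvRaiseWitness_largest_sublist) ∧ Raises_largest_sublist (pvRaiseWitness_largest_sublist) ∧ largest_sublist_alt (pvRaiseWitness_largest_sublist) = pvRaiseWitnessOut_largest_sublist)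

-- ===== LEMMAS AND PROOFS =====

-- appending the next element extends a take-slice by one
theorem lsTakeSnoc (l : List Int) (a j : Nat) (ha : a ≤ j) (hj : j < l.length) :
    (l.drop a).take (j - a) ++ [l[j]] = (l.drop a).take (j + 1 - a) := by
  have h1 : j - a < (l.drop a).length := by simp [List.length_drop]; omega
  have h2 : (l.drop a)[j - a] = l[j] := by
    rw [List.getElem_drop]
    congr 1; omega
  have h3 : j + 1 - a = (j - a) + 1 := by omega
  rw [h3, List.take_add_one]
  simp [List.getElem?_eq_getElem h1, h2]

-- the simulation invariant: A's fold over the tail equals B's fold over the index range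
theorem lsSim (l : List Int) (m : Nat) :
    ∀ (j : Nat) (sub lar : List Int) (bl be cur : Nat),
    l.length - j = m →
    1 ≤ j → j ≤ l.length →
    1 ≤ cur → cur ≤ j →
    sub = (l.drop (j - cur)).take cur →
    PySem.List.pyGetD sub (-1) 0 = PySem.List.pyGetD l ((j : Int) - 1) 0 →
    lar = (l.drop (be + 1 - bl)).take bl →
    lar.length = bl → bl ≤ be + 1 → be + 1 ≤ j →
    (((l.drop j).foldl lsStepA (sub, lar)).2 =
      (fun F => PySem.List.slice l (some (F.2.1 + 1 - F.1)) (some (F.2.1 + 1)))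
        ((PySem.List.pyRange (j : Int) (l.length : Int) 1).foldl (lsStepB l)
          ((bl : Int), (be : Int), (cur : Int)))) := by
  induction m with
  | zero =>
    intro j sub lar bl be cur hm h1j hjn h1c hcj hsub hlast hlar hlarlen hble hbej
    have hj : j = l.length := by omega
    have hdrop : l.drop j = [] := by simp [hj]
    have hrange : PySem.List.pyRange (j : Int) (l.length : Int) 1 = [] := by
      subst hj; simp [PySem.List.pyRange]
    rw [hdrop, hrange]
    simp only [List.foldl_nil]
    have hcast : ((be : Int) + 1 - (bl : Int)) = ((be + 1 - bl : Nat) : Int) := by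
      omega
    have hcast2 : ((be : Int) + 1) = ((be + 1 : Nat) : Int) := by omega
    rw [hcast, hcast2, PySem.List.slice_natCast]
    have : be + 1 - (be + 1 - bl) = bl := by omega
    rw [this, hlar]
  | succ m ih =>
    intro j sub lar bl be cur hm h1j hjn h1c hcj hsub hlast hlar hlarlen hble hbej
    have hjlt : j < l.length := by omega
    have hdrop : l.drop j = l[j] :: l.drop (j + 1) := List.drop_eq_getElem_cons hjlt
    have hrange : PySem.List.pyRange (j : Int) (l.length : Int) 1
        = (j : Int) :: PySem.List.pyRange ((j : Int) + 1) (l.length : Int) 1 := by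
      exact PySem.List.pyRange_one_cons (by exact_mod_cast hjlt)
    -- the two loop guards agree
    have hgj : PySem.List.pyGetD l (j : Int) 0 = l[j] := by
      rw [PySem.List.pyGetD_eq_getElem l 0 (by positivity) (by exact_mod_cast hjlt)]
      simp
    have hsublen : sub.length = cur := by
      rw [hsub]; simp [List.length_take, List.length_drop]; omega
    -- case on the guard
    by_cases hg : l[j] - PySem.List.pyGetD sub (-1) 0 = 1
    · -- run continues
      have hgB : PySem.List.pyGetD l (j : Int) 0 - PySem.List.pyGetD l ((j : Int) - 1) 0 = 1 := by
        rw [hgj, ← hlast]; exact hg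
      have hstepA : lsStepA (sub, lar) l[j]
          = (sub ++ [l[j]], if lar.length < (sub ++ [l[j]]).length then sub ++ [l[j]] else lar) := by
        simp only [lsStepA, if_pos hg]
      have hsub' : sub ++ [l[j]] = (l.drop (j + 1 - (cur + 1))).take (cur + 1) := by
        have ha : j - cur ≤ j := by omega
        have e1 : (l.drop (j - cur)).take (j - (j - cur)) ++ [l[j]]
            = (l.drop (j - cur)).take (j + 1 - (j - cur)) := lsTakeSnoc l (j - cur) j ha hjlt
        have e2 : j - (j - cur) = cur := by omega
        have e3 : j + 1 - (j - cur) = cur + 1 := by omega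
        have e4 : j + 1 - (cur + 1) = j - cur := by omega
        rw [e4, ← e2, hsub]
        rw [e2] at e1 ⊢
        rw [e1, e3]
      rw [hdrop, hrange, List.foldl_cons, List.foldl_cons, hstepA]
      have hstepB : lsStepB l ((bl : Int), (be : Int), (cur : Int)) (j : Int)
          = (if (bl : Int) < (cur : Int) + 1 then (((cur : Int) + 1), (j : Int), ((cur : Int) + 1))
             else ((bl : Int), (be : Int), (cur : Int) + 1)) := by
        simp only [lsStepB, if_pos hgB]
      rw [hstepB]
      by_cases hupd : bl < cur + 1
      · have hcondA : lar.length < (sub ++ [l[j]]).length := by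
          rw [hlarlen]; simp [hsublen]; omega
        rw [if_pos hcondA, if_pos (by exact_mod_cast hupd)]
        have hc1 : ((cur : Int) + 1) = ((cur + 1 : Nat) : Int) := by push_cast; ring
        have hc2 : ((j : Int)) = ((j : Nat) : Int) := rfl
        rw [hc1]
        exact ih (j + 1) (sub ++ [l[j]]) (sub ++ [l[j]]) (cur + 1) j (cur + 1)
          (by omega) (by omega) (by omega) (by omega) (by omega)
          hsub'
          (by rw [PySem.List.pyGetD_neg_one_append_singleton, ← hgj]; congr 1; push_cast; ring)
          hsub'
          (by simp [hsublen])
          (by omega) (by omega)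
      · have hcondA : ¬ lar.length < (sub ++ [l[j]]).length := by
          rw [hlarlen]; simp [hsublen]; omega
        rw [if_neg hcondA, if_neg (by exact_mod_cast hupd)]
        have hc1 : ((cur : Int) + 1) = ((cur + 1 : Nat) : Int) := by push_cast; ring
        rw [hc1]
        exact ih (j + 1) (sub ++ [l[j]]) lar bl be (cur + 1)
          (by omega) (by omega) (by omega) (by omega) (by omega)
          hsub'
          (by rw [PySem.List.pyGetD_neg_one_append_singleton, ← hgj]; congr 1; push_cast; ring)
          hlar hlarlen (by omega) (by omega)
    · -- run breaks
      have hgB : ¬ PySem.List.pyGetD l (j : Int) 0 - PySem.List.pyGetD l ((j : Int) - 1) 0 = 1 := by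
        rw [hgj, ← hlast]; exact hg
      have hstepA : lsStepA (sub, lar) l[j]
          = ([l[j]], if lar.length < 1 then [l[j]] else lar) := by
        simp only [lsStepA, if_neg hg]; rfl
      have hsub' : [l[j]] = (l.drop (j + 1 - 1)).take 1 := by
        have e : j + 1 - 1 = j := rfl
        rw [e, hdrop]
        rfl
      rw [hdrop, hrange, List.foldl_cons, List.foldl_cons, hstepA]
      have hstepB : lsStepB l ((bl : Int), (be : Int), (cur : Int)) (j : Int)
          = (if (bl : Int) < 1 then ((1 : Int), (j : Int), (1 : Int))
             else ((bl : Int), (be : Int), (1 : Int))) := by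
        simp only [lsStepB, if_neg hgB]
      rw [hstepB]
      by_cases hupd : bl < 1
      · rw [if_pos (by rw [hlarlen]; omega), if_pos (by exact_mod_cast hupd)]
        have hc1 : ((1 : Int)) = (((1 : Nat)) : Int) := rfl
        rw [hc1]
        exact ih (j + 1) [l[j]] [l[j]] 1 j 1
          (by omega) (by omega) (by omega) (by omega) (by omega)
          hsub'
          (by rw [show ([l[j]] : List Int) = [] ++ [l[j]] from rfl,
                  PySem.List.pyGetD_neg_one_append_singleton, ← hgj]; congr 1; push_cast; ring)
          hsub'
          (by simp) (by omega) (by omega)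
      · rw [if_neg (by rw [hlarlen]; omega), if_neg (by exact_mod_cast hupd)]
        have hc1 : ((1 : Int)) = (((1 : Nat)) : Int) := rfl
        rw [hc1]
        exact ih (j + 1) [l[j]] lar bl be 1
          (by omega) (by omega) (by omega) (by omega) (by omega)
          hsub'
          (by rw [show ([l[j]] : List Int) = [] ++ [l[j]] from rfl,
                  PySem.List.pyGetD_neg_one_append_singleton, ← hgj]; congr 1; push_cast; ring)
          hlar hlarlen (by omega) (by omega)

-- ===== VERDICT (by name: the statement is the Claim_ definition above) =====
theorem largest_sublist_spec : Claim_equal_largest_sublist := by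
  intro l _ hpre
  unfold Spec_largest_sublist
  cases l with
  | nil => exact absurd rfl hpre
  | cons x rest =>
    have hsim := lsSim (x :: rest) ((x :: rest).length - 1) 1 [x] [] 0 0 1 rfl
      (by omega) (by simp) (by omega) (by omega)
      (by simp)
      (by rw [show ([x] : List Int) = [] ++ [x] from rfl,
              PySem.List.pyGetD_neg_one_append_singleton]
          simp [PySem.List.pyGetD, PySem.List.pyGet?, PySem.List.pyIdx?])
      (by simp) (by simp) (by omega) (by omega)
    simp only [List.drop_one, List.tail_cons, Nat.cast_zero, Nat.cast_one] at hsim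
    simp only [largest_sublist, largest_sublist_alt]
    exact hsim

theorem largest_sublist_raises : Claim_raises_largest_sublist := by
  unfold Claim_raises_largest_sublist
  exact ⟨fun l _ hr hp => hp hr, by decide⟩

-- self-check of the raise witness: B's port really returns the stated literal there
theorem pvRaiseWitness_largest_sublist_ok :
    largest_sublist_alt pvRaiseWitness_largest_sublist = pvRaiseWitnessOut_largest_sublist :=
  largest_sublist_raises.2.2.2
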